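-- pv_equiv track=rewrite | github.com/NigelKay/CS50 | 6 Python/readability.py | getCounts
-- ===== SOURCE A (Python) =====
-- def getCounts(string):
--     d = dict()
--     letters = 0
--     words = 1  # Counts last word
--     sentences = 0
--
--     for char in string:
--         if char == ' ':
--             words += 1
--         elif char in ['.', '!', '?']:
--             sentences += 1
--         elif char.isalpha():
--             letters += 1
--
--     d['letters'] = letters
--     d['words'] = words
--     d['sentences'] = sentences
--
--     return d
-- ===== SOURCE B (Python) =====
-- def getCounts(string):
--     return {
--         'letters': sum(1 for c in string if c.isalpha()),
--         'words': 1 + sum(1 for c in string if c == ' '),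
--         'sentences': sum(1 for c in string if c in '.!?'),
--     }
-- ===== Notes on version B (the rewrite author's own statement) =====
-- stated objective: simpler
-- what changed: Replaces the single branching elif-chain loop with mutable counters by three independent per-class scans (comprehension sums) feeding a dict literal, valid because space/sentence-punctuation/alpha are mutually exclusive character classes.
import Mathlib
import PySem

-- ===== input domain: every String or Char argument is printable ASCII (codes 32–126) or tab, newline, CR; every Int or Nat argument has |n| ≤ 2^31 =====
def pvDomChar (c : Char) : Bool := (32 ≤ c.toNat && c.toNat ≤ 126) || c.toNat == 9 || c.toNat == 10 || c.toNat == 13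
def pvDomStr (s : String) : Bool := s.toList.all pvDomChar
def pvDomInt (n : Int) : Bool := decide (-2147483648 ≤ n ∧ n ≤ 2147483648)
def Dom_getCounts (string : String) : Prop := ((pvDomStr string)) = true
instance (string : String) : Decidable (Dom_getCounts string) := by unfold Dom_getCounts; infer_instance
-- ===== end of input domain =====

-- B computes the three counts by independent per-class scans instead of A's single branching loop (objective: simpler).
-- ===== PORT A =====
def getCounts (string : String) : List (String × Int) :=
  let acc := string.toList.foldl (fun (s : Int × Int × Int) char =>
      if char == ' ' then (s.1, s.2.1 + 1, s.2.2)
      else if ['.', '!', '?'].contains char then (s.1, s.2.1, s.2.2 + 1)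
      else if PySem.Chars.isalpha char then (s.1 + 1, s.2.1, s.2.2)
      else s) (0, 1, 0)
  ((((PySem.Dict.empty).insert "letters" acc.1).insert "words" acc.2.1).insert "sentences" acc.2.2).items

-- ===== PORT B =====
def getCounts_alt (string : String) : List (String × Int) :=
  [("letters", ((string.toList.filter (fun c => PySem.Chars.isalpha c)).map (fun _ => (1 : Int))).sum),
   ("words", 1 + ((string.toList.filter (fun c => c == ' ')).map (fun _ => (1 : Int))).sum),
   ("sentences", ((string.toList.filter (fun c => PySem.Chars.isIn [c] ['.', '!', '?'])).map (fun _ => (1 : Int))).sum)]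

-- ===== PRECONDITION & SPEC =====
def Spec_getCounts (string : String) (out : List (String × Int)) : Prop := out = getCounts_alt string
instance (string : String) (out : List (String × Int)) : Decidable (Spec_getCounts string out) := by unfold Spec_getCounts; infer_instance

-- ===== CLAIM (what is proved, stated in full; the proofs are below) =====
def Claim_equal_getCounts : Prop := ∀ (string : String), Dom_getCounts string → Spec_getCounts string (getCounts string)

-- ===== LEMMAS AND PROOFS =====

-- The single branching loop of A computes the three independent class counts.
theorem loopA_eq_counts (l : List Char) (a b c : Int) :
    l.foldl (fun (s : Int × Int × Int) char =>
      if char == ' ' then (s.1, s.2.1 + 1, s.2.2)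
      else if ['.', '!', '?'].contains char then (s.1, s.2.1, s.2.2 + 1)
      else if PySem.Chars.isalpha char then (s.1 + 1, s.2.1, s.2.2)
      else s) (a, b, c)
    = (a + (l.countP (fun x => PySem.Chars.isalpha x) : Int),
       b + (l.countP (fun x => x == ' ') : Int),
       c + (l.countP (fun x => PySem.Chars.isIn [x] ['.', '!', '?']) : Int)) := by
  induction l generalizing a b c with
  | nil => simp
  | cons x l ih =>
    rw [List.foldl_cons]
    by_cases hs : (x == ' ') = true
    · have hx : x = ' ' := by simpa using hs
      subst hx
      have h1 : PySem.Chars.isalpha ' ' = false := by decide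
      have h2 : PySem.Chars.isIn [' '] ['.', '!', '?'] = false := by decide
      rw [if_pos hs, ih]
      simp only [List.countP_cons, h1, h2, hs, if_true, Prod.mk.injEq]
      refine ⟨by push_cast; ring, by push_cast; ring, by push_cast; ring⟩
    · rw [if_neg hs]
      by_cases hp : (['.', '!', '?'].contains x) = true
      · have hx : x = '.' ∨ x = '!' ∨ x = '?' := by simpa using hp
        have h1 : PySem.Chars.isalpha x = false := by
          rcases hx with h | h | h <;> subst h <;> decide
        have h2 : PySem.Chars.isIn [x] ['.', '!', '?'] = true := by
          rcases hx with h | h | h <;> subst h <;> decide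
        rw [if_pos hp, ih]
        simp only [List.countP_cons, h1, h2, hs, if_true, Prod.mk.injEq]
        refine ⟨by push_cast; ring, by push_cast; ring, by push_cast; ring⟩
      · have h2 : PySem.Chars.isIn [x] ['.', '!', '?'] = false := by
          rw [PySem.Chars.isIn_eq_false_iff]
          intro hinf
          have hm : x ∈ ['.', '!', '?'] := hinf.mem (by simp)
          have : (['.', '!', '?'].contains x) = true := by simpa using hm
          exact hp this
        rw [if_neg hp]
        by_cases ha : PySem.Chars.isalpha x = true
        · rw [if_pos ha, ih]
          simp only [List.countP_cons, ha, h2, hs, if_true, Prod.mk.injEq]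
          refine ⟨by push_cast; ring, by push_cast; ring, by push_cast; ring⟩
        · have ha' : PySem.Chars.isalpha x = false := by simpa using ha
          rw [if_neg ha, ih]
          simp only [List.countP_cons, ha', h2, hs, Prod.mk.injEq]
          refine ⟨by push_cast; ring, by push_cast; ring, by push_cast; ring⟩

-- ===== VERDICT (by name: the statement is the Claim_ definition above) =====
theorem getCounts_spec : Claim_equal_getCounts := by
  intro string _
  unfold Spec_getCounts getCounts getCounts_alt
  rw [loopA_eq_counts]
  simp [PySem.Dict.items_insert_of_not_contains, PySem.Dict.contains_insert,
    PySem.Dict.empty, List.countP_eq_length_filter]
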